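-- pv_equiv track=rewrite | github.com/doobMM/hibari_tda | WK10/preprocess.py | group_pitches
-- ===== SOURCE A (Python) =====
-- import itertools
--
-- def group_pitches(data : list, pithces_only : bool = False):
--     """
--     (start, pitch, end) 튜플 리스트에서 (start, end)가 같은 튜플들을 그룹화하고,
--     pitch를 리스트로 묶습니다.
--
--     Args:
--         data (list): (start, pitch, end) 튜플 리스트.
--
--     Returns:
--         list: (start, pitches, end) 튜플 리스트 (pitches는 리스트).
--     """
--     # (start, end)를 기준으로 정렬
--     data.sort(key=lambda x: (x[0], x[2]))
--
--     # (start, end)가 같은 튜플들을 그룹화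
--     grouped_data = []
--
--     if pithces_only :
--         for (start, end), group in itertools.groupby(data, key=lambda x: (x[0], x[2])):
--             pitches = set(item[1] for item in group)  # 그룹 내의 pitch들을 set으로 묶음
--             grouped_data.append(pitches)  # 새로운 튜플 생성
--     else :
--         for (start, end), group in itertools.groupby(data, key=lambda x: (x[0], x[2])):
--             pitches = set(item[1] for item in group)  # 그룹 내의 pitch들을 set으로 묶음
--             grouped_data.append((start, pitches, end))  # 새로운 튜플 생성
--
--     return grouped_data
-- ===== SOURCE B (Python) =====
-- def group_pitches(data: list, pithces_only: bool = False):
--     # Same in-place sort as A (the caller can observe the mutation).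
--     data.sort(key=lambda x: (x[0], x[2]))
--
--     # First pass: collect the distinct (start, end) keys in first-occurrence
--     # (= sorted-group) order.
--     keys = []
--     for start, _, end in data:
--         if (start, end) not in keys:
--             keys.append((start, end))
--
--     # Second stage: for each key, scan data and gather its pitches as a set.
--     if pithces_only:
--         return [{p for s, p, e in data if (s, e) == key} for key in keys]
--     return [(key[0], {p for s, p, e in data if (s, e) == key}, key[1])
--             for key in keys]
-- ===== Notes on version B (the rewrite author's own statement) =====
-- stated objective: alternative
-- what changed: Replaces itertools.groupby's single run-scan over the sorted list with a two-stage scheme: one pass collecting the distinct (start,end) keys in first-occurrence order, then a per-key filtering scan of data building each pitch set; same result because the stable sort makes first-occurrence order equal group order.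
-- outside the precondition, e.g. on group_pitches([(0, 1, 2)], True): A returns [{1}], B returns [{1}]
import Mathlib
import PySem

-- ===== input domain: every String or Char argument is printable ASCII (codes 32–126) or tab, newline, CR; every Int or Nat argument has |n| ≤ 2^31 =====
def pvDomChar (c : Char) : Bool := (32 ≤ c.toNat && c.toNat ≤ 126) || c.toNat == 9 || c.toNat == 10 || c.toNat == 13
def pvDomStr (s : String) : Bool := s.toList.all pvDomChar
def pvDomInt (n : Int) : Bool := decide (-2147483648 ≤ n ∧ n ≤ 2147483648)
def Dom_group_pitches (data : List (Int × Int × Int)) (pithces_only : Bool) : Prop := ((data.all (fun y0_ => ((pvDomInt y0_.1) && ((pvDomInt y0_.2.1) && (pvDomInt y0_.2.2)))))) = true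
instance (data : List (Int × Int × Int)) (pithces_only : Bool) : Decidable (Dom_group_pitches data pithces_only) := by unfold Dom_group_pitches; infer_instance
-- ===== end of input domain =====

-- B replaces A's itertools.groupby run-scan with a two-stage scheme: one pass collecting the
-- distinct (start, end) keys in first-occurrence order, then a per-key filtering scan of the
-- data building each pitch set (alternative decomposition; not claimed faster).
-- Both Pythons sort `data` in place; the theorems below are about the RETURN value only
-- (B performs the identical in-place sort).

-- ===== PORT A =====
-- itertools.groupby(s, key=lambda x: (x[0], x[2])): maximal runs of equal key, in order.
def pvGroupby : List (Int × Int × Int) → List ((Int × Int) × List (Int × Int × Int))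
  | [] => []
  | x :: xs =>
      ((x.1, x.2.2), x :: xs.takeWhile (fun y => (y.1, y.2.2) == (x.1, x.2.2))) ::
        pvGroupby (xs.dropWhile (fun y => (y.1, y.2.2) == (x.1, x.2.2)))
  termination_by l => l.length
  decreasing_by
    exact Nat.lt_succ_of_le (List.length_dropWhile_le _ _)

-- In the pithces_only branch Python appends the BARE set `pitches` (not a value of the
-- declared result type); on that branch — excluded by Pre_ — both ports use the same
-- (start, pitches, end) encoding instead.
def group_pitches (data : List (Int × Int × Int)) (pithces_only : Bool) : List (Int × List Int × Int) :=
  let s := PySem.List.sorted2 data (fun x => x.1) (fun x => x.2.2)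
  if pithces_only then
    (pvGroupby s).foldl
      (fun acc g => acc ++ [(g.1.1, PySem.Set.ofList (g.2.map (fun item => item.2.1)), g.1.2)]) []
  else
    (pvGroupby s).foldl
      (fun acc g => acc ++ [(g.1.1, PySem.Set.ofList (g.2.map (fun item => item.2.1)), g.1.2)]) []

-- ===== PORT B =====
def group_pitches_alt (data : List (Int × Int × Int)) (pithces_only : Bool) : List (Int × List Int × Int) :=
  let s := PySem.List.sorted2 data (fun x => x.1) (fun x => x.2.2)
  -- first pass: keys = []; for start, _, end in data: if (start, end) not in keys: append
  let keys : List (Int × Int) :=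
    s.foldl (fun ks x => if ks.contains (x.1, x.2.2) then ks else ks ++ [(x.1, x.2.2)]) []
  -- second stage: per-key filtering scan, set comprehension over the matching pitches
  if pithces_only then
    keys.map (fun k =>
      (k.1, PySem.Set.ofList ((s.filter (fun x => (x.1, x.2.2) == k)).map (fun x => x.2.1)), k.2))
  else
    keys.map (fun k =>
      (k.1, PySem.Set.ofList ((s.filter (fun x => (x.1, x.2.2) == k)).map (fun x => x.2.1)), k.2))

-- ===== PRECONDITION & SPEC =====
-- Pre_ excludes pithces_only = true, on which A returns a list of BARE sets — not a value of
-- the declared result type List (Int × List Int × Int) (B returns the same list of sets there).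
def Pre_group_pitches (data : List (Int × Int × Int)) (pithces_only : Bool) : Prop :=
  pithces_only = false
instance (data : List (Int × Int × Int)) (pithces_only : Bool) : Decidable (Pre_group_pitches data pithces_only) := by unfold Pre_group_pitches; infer_instance

def pvWitness_group_pitches : (List (Int × Int × Int)) × Bool := ([(0, 1, 2), (0, 5, 2), (1, 3, 1)], false)

def Spec_group_pitches (data : List (Int × Int × Int)) (pithces_only : Bool) (out : List (Int × List Int × Int)) : Prop := out = group_pitches_alt data pithces_only
instance (data : List (Int × Int × Int)) (pithces_only : Bool) (out : List (Int × List Int × Int)) : Decidable (Spec_group_pitches data pithces_only out) := by unfold Spec_group_pitches; infer_instance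

-- ===== CLAIM (what is proved, stated in full; the proofs are below) =====
def Claim_equal_group_pitches : Prop := ∀ (data : List (Int × Int × Int)) (pithces_only : Bool), Dom_group_pitches data pithces_only → Pre_group_pitches data pithces_only → Spec_group_pitches data pithces_only (group_pitches data pithces_only)

-- ===== LEMMAS AND PROOFS =====

-- the grouping key, as Python's tuple (x[0], x[2]) with its lexicographic order
def pvK (x : Int × Int × Int) : Lex (Int × Int) := toLex (x.1, x.2.2)

lemma pv_sorted2_eq_lex (xs : List (Int × Int × Int)) :
    PySem.List.sorted2 xs (fun x => x.1) (fun x => x.2.2) = PySem.List.sorted xs pvK := by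
  rw [PySem.List.sorted_eq_foldl_insertBy, PySem.List.sorted2]
  simp only [if_neg (by simp : ¬ (false = true))]
  congr 1
  funext acc x
  congr 1
  funext a b
  simp only [pvK, Prod.Lex.lt_iff, ofLex_toLex]
  rcases lt_trichotomy a.1 b.1 with h | h | h <;>
    simp [h, not_lt_of_gt] <;> omega

lemma pvK_eq_iff (a b : Int × Int × Int) : pvK a = pvK b ↔ (a.1, a.2.2) = (b.1, b.2.2) := by
  simp [pvK]

lemma pv_rest_ne (x : Int × Int × Int) (xs : List (Int × Int × Int))
    (hp : ∀ y ∈ xs, pvK x ≤ pvK y)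
    (hpw : xs.Pairwise (fun a b => pvK a ≤ pvK b)) :
    ∀ y ∈ xs.dropWhile (fun y => (y.1, y.2.2) == (x.1, x.2.2)), ¬ ((y.1, y.2.2) = (x.1, x.2.2)) := by
  induction xs with
  | nil => simp
  | cons z zs ih =>
    rcases hpw with - | ⟨hz, hpw'⟩
    by_cases hzx : (z.1, z.2.2) == (x.1, x.2.2)
    · simp only [List.dropWhile_cons, hzx, if_true]
      exact ih (fun y hy => hp y (List.mem_cons_of_mem _ hy)) hpw'
    · simp only [List.dropWhile_cons, hzx, if_false, Bool.false_eq_true]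
      have hzx' : ¬ ((z.1, z.2.2) = (x.1, x.2.2)) := by simpa using hzx
      intro y hy
      rcases List.mem_cons.mp hy with rfl | hy
      · exact hzx'
      · intro hyx
        have h1 : pvK x ≤ pvK z := hp z (List.mem_cons_self)
        have h2 : pvK z ≤ pvK y := hz y hy
        have h3 : pvK y = pvK x := (pvK_eq_iff y x).mpr hyx
        have : pvK z = pvK x := le_antisymm (h3 ▸ h2) h1
        exact hzx' ((pvK_eq_iff z x).mp this)

lemma pv_foldl_add_const {a : Int × Int} {l : List (Int × Int)} (h : ∀ y ∈ l, y = a) :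
    List.foldl PySem.Set.add [a] l = [a] := by
  induction l with
  | nil => rfl
  | cons z zs ih =>
    have hz : z = a := h z List.mem_cons_self
    subst hz
    rw [List.foldl_cons, PySem.Set.add_of_mem (List.mem_singleton_self _)]
    exact ih (fun y hy => h y (List.mem_cons_of_mem _ hy))

lemma pv_ofList_run (a : Int × Int) (l1 l2 : List (Int × Int))
    (h1 : ∀ y ∈ l1, y = a) (h2 : a ∉ l2) :
    PySem.Set.ofList (a :: (l1 ++ l2)) = a :: PySem.Set.ofList l2 := by
  rw [PySem.Set.ofList_eq_foldl, List.foldl_cons, List.foldl_append]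
  have h0 : PySem.Set.add ([] : PySem.Set (Int × Int)) a = [a] := by
    simp [PySem.Set.add, PySem.Set.contains]
  rw [h0, pv_foldl_add_const h1]
  have : ∀ (l : List (Int × Int)) (s : PySem.Set (Int × Int)), (∀ y ∈ l, y ≠ a) → a ∉ s →
      List.foldl PySem.Set.add (a :: s) l = a :: List.foldl PySem.Set.add s l := by
    intro l
    induction l with
    | nil => intro s _ _; rfl
    | cons z zs ih =>
      intro s hne ha
      have hza : z ≠ a := hne z List.mem_cons_self
      rw [List.foldl_cons, List.foldl_cons]
      have hadd : PySem.Set.add (a :: s) z = a :: PySem.Set.add s z := by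
        by_cases hz : z ∈ s
        · rw [PySem.Set.add_of_mem hz, PySem.Set.add_of_mem (List.mem_cons_of_mem _ hz)]
        · rw [PySem.Set.add_of_not_mem hz, PySem.Set.add_of_not_mem (by simp [hza, hz])]
          rfl
      rw [hadd]
      exact ih _ (fun y hy => hne y (List.mem_cons_of_mem _ hy))
        (by simp [PySem.Set.mem_add, ha, Ne.symm hza])
  rw [this l2 [] (fun y hy heq => h2 (heq ▸ hy)) (by simp), ← PySem.Set.ofList_eq_foldl]

-- A's groupby loop, on a list sorted by the key, equals the per-distinct-key filter view.
lemma pv_groupby_eq (s : List (Int × Int × Int))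
    (hpw : s.Pairwise (fun a b => pvK a ≤ pvK b)) :
    pvGroupby s = (PySem.Set.ofList (s.map (fun x => (x.1, x.2.2)))).map
      (fun c => (c, s.filter (fun x => (x.1, x.2.2) == c))) := by
  induction s using pvGroupby.induct with
  | case1 => simp [pvGroupby]
  | case2 x xs ih =>
    rcases hpw with - | ⟨hx, hpw'⟩
    have hxle : ∀ y ∈ xs, pvK x ≤ pvK y := hx
    have hrun : ∀ y ∈ xs.takeWhile (fun y => (y.1, y.2.2) == (x.1, x.2.2)),
        (y.1, y.2.2) = (x.1, x.2.2) := by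
      intro y hy
      simpa using List.mem_takeWhile_imp hy
    have hrest := pv_rest_ne x xs hxle hpw'
    have hsplit : xs.takeWhile (fun y => (y.1, y.2.2) == (x.1, x.2.2)) ++
        xs.dropWhile (fun y => (y.1, y.2.2) == (x.1, x.2.2)) = xs :=
      List.takeWhile_append_dropWhile
    set run := xs.takeWhile (fun y => (y.1, y.2.2) == (x.1, x.2.2)) with hrundef
    set rest := xs.dropWhile (fun y => (y.1, y.2.2) == (x.1, x.2.2)) with hrestdef
    have hpwrest : rest.Pairwise (fun a b => pvK a ≤ pvK b) :=
      hpw'.sublist (List.dropWhile_sublist _)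
    have hmap : (x :: xs).map (fun y => (y.1, y.2.2))
        = (x.1, x.2.2) :: (run.map (fun y => (y.1, y.2.2)) ++ rest.map (fun y => (y.1, y.2.2))) := by
      rw [List.map_cons, ← List.map_append, hsplit]
    have hofList : PySem.Set.ofList ((x :: xs).map (fun y => (y.1, y.2.2)))
        = (x.1, x.2.2) :: PySem.Set.ofList (rest.map (fun y => (y.1, y.2.2))) := by
      rw [hmap]
      refine pv_ofList_run _ _ _ ?_ ?_
      · intro y hy
        obtain ⟨z, hz, rfl⟩ := List.mem_map.mp hy
        exact hrun z hz
      · intro hmem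
        obtain ⟨y, hy, heq⟩ := List.mem_map.mp hmem
        exact hrest y hy heq
    have hfilter_run : run.filter (fun y => (y.1, y.2.2) == (x.1, x.2.2)) = run :=
      List.filter_eq_self.mpr (fun y hy => by simpa using hrun y hy)
    have hfilter_rest : rest.filter (fun y => (y.1, y.2.2) == (x.1, x.2.2)) = [] :=
      List.filter_eq_nil_iff.mpr (fun y hy => by simpa using hrest y hy)
    have hhead : (x :: xs).filter (fun y => (y.1, y.2.2) == (x.1, x.2.2)) = x :: run := by
      rw [List.filter_cons_of_pos (by simp), ← hsplit, List.filter_append,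
        hfilter_run, hfilter_rest, List.append_nil]
    rw [pvGroupby, hofList, List.map_cons, ← hrestdef, ← hrundef, hhead]
    congr 1
    rw [ih hpwrest]
    refine List.map_congr_left ?_
    intro c hc
    have hc' : c ∈ rest.map (fun y => (y.1, y.2.2)) := (PySem.Set.mem_ofList _ _).mp hc
    rcases List.mem_map.mp hc' with ⟨y0, hy0, rfl⟩
    have hcne : ¬ ((x.1, x.2.2) = (y0.1, y0.2.2)) := fun h => hrest y0 hy0 h.symm
    have hrunne : run.filter (fun y => (y.1, y.2.2) == (y0.1, y0.2.2)) = [] :=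
      List.filter_eq_nil_iff.mpr (fun y hy => by
        simp only [beq_iff_eq]
        rw [hrun y hy]
        simpa using hcne)
    congr 1
    rw [List.filter_cons_of_neg (by simpa using hcne), ← hsplit, List.filter_append, hrunne,
      List.nil_append]

-- B's first-pass key collection is exactly set(first occurrences) of the mapped keys.
lemma pv_keys_eq (s : List (Int × Int × Int)) :
    s.foldl (fun ks x => if ks.contains (x.1, x.2.2) then ks else ks ++ [(x.1, x.2.2)]) []
      = PySem.Set.ofList (s.map (fun x => (x.1, x.2.2))) := by
  rw [PySem.Set.ofList_eq_foldl, List.foldl_map]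
  congr 1

-- ===== VERDICT (by name: the statement is the Claim_ definition above) =====
theorem group_pitches_spec : Claim_equal_group_pitches := by
  intro data po _ hpre
  unfold Pre_group_pitches at hpre
  subst hpre
  unfold Spec_group_pitches group_pitches group_pitches_alt
  simp only [Bool.false_eq_true, if_false]
  have hpw : (PySem.List.sorted2 data (fun x => x.1) (fun x => x.2.2)).Pairwise
      (fun a b => pvK a ≤ pvK b) := by
    rw [pv_sorted2_eq_lex]
    exact PySem.List.sorted_pairwise data pvK
  set s := PySem.List.sorted2 data (fun x => x.1) (fun x => x.2.2) with hs
  have hA : List.foldl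
      (fun acc g => acc ++ [(g.1.1, PySem.Set.ofList (List.map (fun item => item.2.1) g.2), g.1.2)])
      [] (pvGroupby s)
      = [] ++ (pvGroupby s).map
        (fun g => (g.1.1, PySem.Set.ofList (List.map (fun item => item.2.1) g.2), g.1.2)) :=
    PySem.List.foldl_append_singleton_eq_map _ _ _
  rw [hA, List.nil_append, pv_groupby_eq s hpw, List.map_map, pv_keys_eq s]
  rfl
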